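-- pv_equiv track=rewrite | github.com/AthulSree/e_empeeyaar | candidate/views.py | find_name_in_text
-- ===== SOURCE A (Python) =====
-- def find_name_in_text( text, names, s_mprformonth):
--     for name in names:
--         if name in text:
--             if 'Monthly Performance Report' in text:
--                 return f"{name}_MPR_"+s_mprformonth
--             elif 'Leave Adjustment Certificate' in text:
--                 return f"{name}_LAC_"+s_mprformonth
--     return None
-- ===== SOURCE B (Python) =====
-- def find_name_in_text(text, names, s_mprformonth):
--     if 'Monthly Performance Report' in text:
--         tag = '_MPR_'
--     elif 'Leave Adjustment Certificate' in text:
--         tag = '_LAC_'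
--     else:
--         return None
--     # substring index: every slice of text whose length is some name's length
--     lens = {len(n) for n in names}
--     subs = {text[i:i + L] for L in lens for i in range(len(text) - L + 1)}
--     for name in names:
--         if name in subs:
--             return name + tag + s_mprformonth
--     return None
-- ===== Notes on version B (the rewrite author's own statement) =====
-- stated objective: faster
-- what changed: B classifies the report type once instead of re-scanning the text for the two phrases at every matching name, and replaces A's per-name in-text scans by a substring index: one hash set of all slices of text whose length is some name's length, answered by set membership per name.
import Mathlib
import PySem

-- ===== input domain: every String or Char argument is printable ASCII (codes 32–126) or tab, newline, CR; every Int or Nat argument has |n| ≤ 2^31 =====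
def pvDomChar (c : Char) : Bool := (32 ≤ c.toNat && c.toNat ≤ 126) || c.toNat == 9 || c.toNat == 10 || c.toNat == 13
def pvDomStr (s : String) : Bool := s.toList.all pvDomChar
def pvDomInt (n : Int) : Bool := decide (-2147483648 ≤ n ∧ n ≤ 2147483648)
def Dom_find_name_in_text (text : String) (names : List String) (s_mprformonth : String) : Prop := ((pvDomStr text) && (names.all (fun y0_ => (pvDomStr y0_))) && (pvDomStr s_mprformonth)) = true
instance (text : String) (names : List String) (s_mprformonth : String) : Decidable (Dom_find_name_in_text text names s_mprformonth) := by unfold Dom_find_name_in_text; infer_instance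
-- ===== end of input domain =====

-- B classifies the report type once, then answers each name by membership in a set of all
-- relevant-length slices of the text instead of A's repeated in-text scans; return value only.

-- ===== PORT A =====
-- A's loop over names, with the phrase checks inside the loop body, exactly as in A
def pvLoopA (text : String) (s_mprformonth : String) : List String → Option String
  | [] => none
  | name :: rest =>
      if PySem.Str.isIn name text then
        if PySem.Str.isIn "Monthly Performance Report" text then
          some (name ++ "_MPR_" ++ s_mprformonth)
        else if PySem.Str.isIn "Leave Adjustment Certificate" text then
          some (name ++ "_LAC_" ++ s_mprformonth)
        else pvLoopA text s_mprformonth rest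
      else pvLoopA text s_mprformonth rest

def find_name_in_text (text : String) (names : List String) (s_mprformonth : String) : Option String :=
  pvLoopA text s_mprformonth names

-- ===== PORT B =====
-- {text[i:i+L] for L in lens for i in range(len(text)-L+1)} — set-comprehension over the set of lengths
def pvSubs (t : List Char) (lens : List Nat) : PySem.Set (List Char) :=
  lens.foldl
    (fun acc (L : Nat) =>
      (PySem.List.pyRange 0 ((t.length : Int) - (L : Int) + 1)).foldl
        (fun acc2 i => PySem.Set.add acc2 (PySem.List.slice t (some i) (some (i + (L : Int))))) acc)
    PySem.Set.empty

-- B's final loop: first name that is in the substring index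
def pvScan (subs : PySem.Set (List Char)) (tag s_mprformonth : String) : List String → Option String
  | [] => none
  | name :: rest =>
      if PySem.Set.contains subs name.toList then some (name ++ tag ++ s_mprformonth)
      else pvScan subs tag s_mprformonth rest

def find_name_in_text_alt (text : String) (names : List String) (s_mprformonth : String) : Option String :=
  if PySem.Str.isIn "Monthly Performance Report" text then
    pvScan (pvSubs text.toList (PySem.Set.ofList (names.map (fun n => n.toList.length)))) "_MPR_" s_mprformonth names
  else if PySem.Str.isIn "Leave Adjustment Certificate" text then
    pvScan (pvSubs text.toList (PySem.Set.ofList (names.map (fun n => n.toList.length)))) "_LAC_" s_mprformonth names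
  else none

-- ===== PRECONDITION & SPEC =====
def Spec_find_name_in_text (text : String) (names : List String) (s_mprformonth : String) (out : Option String) : Prop := out = find_name_in_text_alt text names s_mprformonth
instance (text : String) (names : List String) (s_mprformonth : String) (out : Option String) : Decidable (Spec_find_name_in_text text names s_mprformonth out) := by unfold Spec_find_name_in_text; infer_instance

-- ===== CLAIM (what is proved, stated in full; the proofs are below) =====
def Claim_equal_find_name_in_text : Prop := ∀ (text : String) (names : List String) (s_mprformonth : String), Dom_find_name_in_text text names s_mprformonth → Spec_find_name_in_text text names s_mprformonth (find_name_in_text text names s_mprformonth)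

-- ===== LEMMAS AND PROOFS =====

-- membership in a fold of Set.add over a mapped list
theorem mem_foldl_set_add {α β : Type} [BEq α] [LawfulBEq α] (f : β → α) (l : List β)
    (acc : PySem.Set α) (x : α) :
    x ∈ l.foldl (fun s b => PySem.Set.add s (f b)) acc ↔ x ∈ acc ∨ ∃ b ∈ l, f b = x := by
  induction l generalizing acc with
  | nil => simp
  | cons b rest ih =>
      simp [List.foldl_cons, ih, PySem.Set.mem_add]
      tauto

-- membership in the substring index, generalized over the fold's accumulator
theorem mem_pvSubs_foldl (t : List Char) (lens : List Nat) (acc : PySem.Set (List Char)) (x : List Char) :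
    x ∈ lens.foldl
        (fun acc (L : Nat) =>
          (PySem.List.pyRange 0 ((t.length : Int) - (L : Int) + 1)).foldl
            (fun acc2 i => PySem.Set.add acc2 (PySem.List.slice t (some i) (some (i + (L : Int))))) acc)
        acc ↔
      x ∈ acc ∨ ∃ L ∈ lens, ∃ i : Int, 0 ≤ i ∧ i < (t.length : Int) - (L : Int) + 1 ∧
        PySem.List.slice t (some i) (some (i + (L : Int))) = x := by
  induction lens generalizing acc with
  | nil => simp
  | cons L rest ih =>
      rw [List.foldl_cons, ih]
      rw [mem_foldl_set_add (f := fun i => PySem.List.slice t (some i) (some (i + (L : Int))))]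
      constructor
      · rintro (⟨hx | ⟨i, hi, hs⟩⟩ | ⟨L', hL', i, h0, hb, hs⟩)
        · exact Or.inl hx
        · obtain ⟨h0, hb⟩ := PySem.List.mem_pyRange_one.mp hi
          exact Or.inr ⟨L, by simp, i, h0, hb, hs⟩
        · exact Or.inr ⟨L', by simp [hL'], i, h0, hb, hs⟩
      · rintro (hx | ⟨L', hL', i, h0, hb, hs⟩)
        · exact Or.inl (Or.inl hx)
        · rcases List.mem_cons.mp hL' with rfl | hL'
          · exact Or.inl (Or.inr ⟨i, PySem.List.mem_pyRange_one.mpr ⟨h0, hb⟩, hs⟩)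
          · exact Or.inr ⟨L', hL', i, h0, hb, hs⟩

theorem mem_pvSubs (t : List Char) (lens : List Nat) (x : List Char) :
    x ∈ pvSubs t lens ↔
      ∃ L ∈ lens, ∃ i : Int, 0 ≤ i ∧ i < (t.length : Int) - (L : Int) + 1 ∧
        PySem.List.slice t (some i) (some (i + (L : Int))) = x := by
  unfold pvSubs
  rw [mem_pvSubs_foldl]
  simp [PySem.Set.empty]

-- the test B performs equals the test A performs, for any name whose length is listed
theorem contains_pvSubs_eq_isIn (text name : String) (lens : List Nat)
    (hL : name.toList.length ∈ lens) :
    PySem.Set.contains (pvSubs text.toList lens) name.toList = PySem.Str.isIn name text := by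
  rw [Bool.eq_iff_iff]
  rw [show (PySem.Set.contains (pvSubs text.toList lens) name.toList = true) ↔
        name.toList ∈ pvSubs text.toList lens from by simp [PySem.Set.contains]]
  rw [mem_pvSubs, PySem.Str.isIn_iff_infix]
  set t := text.toList with ht
  constructor
  · rintro ⟨L, _, i, h0, hb, hs⟩
    obtain ⟨j, rfl⟩ := Int.eq_ofNat_of_zero_le h0
    rw [PySem.List.slice_natCast_add] at hs
    rw [← hs]
    exact ((List.take_prefix _ _).isInfix).trans ((List.drop_suffix _ _).isInfix)
  · intro hinf
    obtain ⟨j, hpre⟩ := (PySem.Chars.exists_prefix_drop_iff_isIn name.toList t).mpr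
      ((PySem.Chars.isIn_iff_infix name.toList t).mpr hinf)
    have hpre' : name.toList <+: t.drop (min j t.length) := by
      rcases le_or_gt j t.length with hj | hj
      · simpa [min_eq_left hj] using hpre
      · have : t.drop j = [] := List.drop_eq_nil_of_le (by omega)
        rw [this, List.prefix_nil] at hpre
        simp [hpre]
    set j' := min j t.length with hj'
    have hlen : name.toList.length ≤ t.length - j' :=
      le_trans hpre'.length_le (by rw [List.length_drop])
    have hj'le : j' ≤ t.length := min_le_right _ _
    refine ⟨name.toList.length, hL, (j' : Int), by positivity, by omega, ?_⟩
    rw [PySem.List.slice_natCast_add]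
    exact (List.prefix_iff_eq_take.mp hpre' ▸ rfl : List.take name.toList.length (t.drop j') = name.toList).symm ▸ rfl

-- A's loop with the length set fixed equals B's classify-then-scan
theorem pvLoopA_eq (text s_mprformonth : String) (names : List String)
    (lens : List Nat) (hlens : ∀ n ∈ names, n.toList.length ∈ lens) :
    pvLoopA text s_mprformonth names =
      if PySem.Str.isIn "Monthly Performance Report" text then
        pvScan (pvSubs text.toList lens) "_MPR_" s_mprformonth names
      else if PySem.Str.isIn "Leave Adjustment Certificate" text then
        pvScan (pvSubs text.toList lens) "_LAC_" s_mprformonth names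
      else none := by
  induction names with
  | nil => simp [pvLoopA, pvScan]
  | cons name rest ih =>
      have hmem := contains_pvSubs_eq_isIn text name lens (hlens name (by simp))
      have ih' := ih (fun n hn => hlens n (by simp [hn]))
      simp only [pvLoopA, pvScan, hmem, ih']
      split_ifs <;> rfl

-- ===== VERDICT (by name: the statement is the Claim_ definition above) =====
theorem find_name_in_text_spec : Claim_equal_find_name_in_text := by
  intro text names s _
  unfold Spec_find_name_in_text find_name_in_text find_name_in_text_alt
  exact pvLoopA_eq text s names _ (fun n hn => by
    exact (PySem.Set.mem_ofList _ _).mpr (List.mem_map_of_mem hn))
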